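-- pv_equiv track=rewrite | github.com/thepauljones/advent-of-code | 2023/day12/01.py | get_count_groups
-- ===== SOURCE A (Python) =====
-- def get_count_groups(pattern):
--     isGroup = False
--     result = []
--
--     groupStart = 0
--     for i, char in enumerate(pattern):
--         if isGroup is not True and char == "#":
--             isGroup = True
--             groupStart = i
--
--         if isGroup and char != "#":
--             result.append(i - groupStart)
--             isGroup = False
--
--         if i == len(pattern) - 1 and isGroup:
--             result.append(i - groupStart + 1)
--
--     return result
-- ===== SOURCE B (Python) =====
-- def get_count_groups(pattern):
--     masked = "".join(c if c == "#" else " " for c in pattern)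
--     return [len(run) for run in masked.split()]
-- ===== Notes on version B (the rewrite author's own statement) =====
-- stated objective: idiomatic
-- what changed: Replaces A's index/state-machine loop (isGroup/groupStart flags plus a last-character special case) with masking every non-'#' character to a space and mapping len over str.split()'s runs.
import Mathlib
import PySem

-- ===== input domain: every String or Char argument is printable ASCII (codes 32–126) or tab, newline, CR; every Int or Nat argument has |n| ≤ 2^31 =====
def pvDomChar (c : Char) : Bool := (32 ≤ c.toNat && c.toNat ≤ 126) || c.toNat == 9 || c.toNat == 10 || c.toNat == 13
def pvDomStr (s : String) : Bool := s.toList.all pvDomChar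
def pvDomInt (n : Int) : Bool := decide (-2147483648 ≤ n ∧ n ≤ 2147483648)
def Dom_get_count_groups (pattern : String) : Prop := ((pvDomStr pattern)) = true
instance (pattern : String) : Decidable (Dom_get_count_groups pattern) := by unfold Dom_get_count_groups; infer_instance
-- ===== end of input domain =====

-- B masks every non-'#' character to a space and maps len over str.split()'s runs,
-- replacing A's isGroup/groupStart state machine and last-character special case (objective: idiomatic).

-- ===== PORT A =====
def pvStepA (n : Int) (st : Bool × Int × List Int) (p : Int × Char) : Bool × Int × List Int :=
  let isGroup := st.1
  let groupStart := st.2.1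
  let result := st.2.2
  let i := p.1
  let char := p.2
  let (isGroup, groupStart) := if (!isGroup) && (char == '#') then (true, i) else (isGroup, groupStart)
  let (result, isGroup) := if isGroup && (char != '#') then (result ++ [i - groupStart], false) else (result, isGroup)
  let result := if (i == n - 1) && isGroup then result ++ [i - groupStart + 1] else result
  (isGroup, groupStart, result)

def get_count_groups (pattern : String) : List Int :=
  ((PySem.List.enumerate pattern.toList 0).foldl (pvStepA (PySem.Str.len pattern)) (false, 0, [])).2.2

-- ===== PORT B =====
def get_count_groups_alt (pattern : String) : List Int :=
  let masked : String := String.ofList (pattern.toList.map (fun c => if c == '#' then c else ' '))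
  (PySem.Str.split₀ masked).map (fun run => PySem.Str.len run)

-- ===== PRECONDITION & SPEC =====
def Spec_get_count_groups (pattern : String) (out : List Int) : Prop := out = get_count_groups_alt pattern
instance (pattern : String) (out : List Int) : Decidable (Spec_get_count_groups pattern out) := by unfold Spec_get_count_groups; infer_instance

-- ===== CLAIM (what is proved, stated in full; the proofs are below) =====
def Claim_equal_get_count_groups : Prop := ∀ (pattern : String), Dom_get_count_groups pattern → Spec_get_count_groups pattern (get_count_groups pattern)

-- ===== LEMMAS AND PROOFS =====

-- common model: pvModel s k = group lengths of s, with k '#'s of an open run already seen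
def pvModel : List Char → Nat → List Int
  | [], k => if k = 0 then [] else [(k : Int)]
  | c :: s, k => if c = '#' then pvModel s (k + 1) else (if k = 0 then [] else [(k : Int)]) ++ pvModel s 0

lemma pvA_go (n : Int) : ∀ (s : List Char) (i st : Int) (g : Bool) (res : List Int) (k : Nat),
    i + s.length = n →
    (if g then (st = i - k ∧ 1 ≤ k ∧ s ≠ []) else k = 0) →
    ((PySem.List.enumerate s i).foldl (pvStepA n) (g, st, res)).2.2 = res ++ pvModel s k := by
  intro s
  induction s with
  | nil =>
    intro i st g res k hn hg
    cases g with
    | false => simp at hg; simp [PySem.List.enumerate, pvModel, hg]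
    | true => simp at hg
  | cons c rest ih =>
    intro i st g res k hn hg
    rw [PySem.List.enumerate_cons, List.foldl_cons]
    by_cases hc : c = '#'
    · cases g with
      | false =>
        simp only [if_neg (Bool.false_ne_true)] at hg
        subst hg
        by_cases hrest : rest = []
        · subst hrest
          have hi : i = n - 1 := by simp at hn; omega
          simp [pvStepA, hc, hi, pvModel, PySem.List.enumerate]
        · have hi : ¬ (i = n - 1) := by
            have : (0:Int) < rest.length := by
              cases rest with
              | nil => exact absurd rfl hrest
              | cons a b => simp
            simp at hn ⊢; omega
          have := ih (i + 1) i true res 1 (by simp at hn ⊢; omega)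
            (by simp [hrest])
          simp only [pvStepA, hc] at *
          simpa [pvStepA, hc, hi, pvModel] using this
      | true =>
        simp only [if_pos rfl] at hg
        obtain ⟨hst, hk, -⟩ := hg
        by_cases hrest : rest = []
        · subst hrest
          have hi : i = n - 1 := by simp at hn; omega
          have hke : i - st + 1 = ((k : Int) + 1) := by omega
          simp [pvStepA, hc, hi, pvModel, PySem.List.enumerate, hke]
          all_goals omega
        · have hi : ¬ (i = n - 1) := by
            have : (0:Int) < rest.length := by
              cases rest with
              | nil => exact absurd rfl hrest
              | cons a b => simp
            simp at hn ⊢; omega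
          have := ih (i + 1) st true res (k + 1) (by simp at hn ⊢; omega)
            (by simp [hrest]; push_cast; omega)
          simpa [pvStepA, hc, hi, pvModel] using this
    · cases g with
      | false =>
        simp only [if_neg (Bool.false_ne_true)] at hg
        subst hg
        have := ih (i + 1) st false res 0 (by simp at hn ⊢; omega) (by simp)
        simpa [pvStepA, hc, pvModel] using this
      | true =>
        simp only [if_pos rfl] at hg
        obtain ⟨hst, hk, -⟩ := hg
        have hk0 : ¬ (k = 0) := by omega
        have hke : i - st = (k : Int) := by omega
        have := ih (i + 1) st false (res ++ [(k : Int)]) 0 (by simp at hn ⊢; omega) (by simp)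
        simpa [pvStepA, hc, pvModel, hk0, hke] using this

lemma pvB_go : ∀ (s cur : List Char) (acc : List (List Char)),
    ((PySem.Chars.split₀.go (s.map (fun c => if c == '#' then c else ' ')) cur acc).map
        (fun r => (r.length : Int)))
      = acc.reverse.map (fun r => (r.length : Int)) ++ pvModel s cur.length := by
  intro s
  induction s with
  | nil =>
    intro cur acc
    by_cases hcur : cur = [] <;>
      simp [PySem.Chars.split₀.go, pvModel, hcur, List.isEmpty_iff]
  | cons c rest ih =>
    intro cur acc
    by_cases hc : c = '#'
    · have hsp : PySem.Chars.isspace '#' = false := by decide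
      simpa [PySem.Chars.split₀.go, hc, hsp, pvModel] using ih ('#' :: cur) acc
    · have hsp : PySem.Chars.isspace ' ' = true := by decide
      by_cases hcur : cur = []
      · subst hcur
        simpa [PySem.Chars.split₀.go, hc, hsp, pvModel] using ih [] acc
      · have := ih [] (cur.reverse :: acc)
        simp only [List.length_nil] at this
        simpa [PySem.Chars.split₀.go, hc, hsp, pvModel, List.isEmpty_iff, hcur] using this

-- ===== VERDICT (by name: the statement is the Claim_ definition above) =====
theorem get_count_groups_spec : Claim_equal_get_count_groups := by
  intro pattern _
  unfold Spec_get_count_groups get_count_groups get_count_groups_alt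
  have hA := pvA_go (PySem.Str.len pattern) pattern.toList 0 0 false [] 0
    (by simp [PySem.Str.len]) (by simp)
  have hB := pvB_go pattern.toList [] []
  rw [hA, List.nil_append]
  simp only [PySem.Str.split₀, PySem.Chars.split₀, List.map_map]
  have hm : (String.ofList (pattern.toList.map (fun c => if c == '#' then c else ' '))).toList
      = pattern.toList.map (fun c => if c == '#' then c else ' ') := by simp
  rw [hm]
  rw [show ((fun run => PySem.Str.len run) ∘ String.ofList)
      = (fun r : List Char => (r.length : Int)) from by
    funext r; simp [PySem.Str.len]]
  simpa using hB.symm
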